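-- pv_equiv track=rewrite | github.com/pypi-data/pypi-mirror-389 | packages/runexp/runexp-0.1.4-py3-none-any.whl/runexp/config_file.py | iter_sweep
-- ===== SOURCE A (Python) =====
-- import itertools
-- import typing
--
-- def iter_sweep(
--     base_cfg: dict[str, typing.Any], sweep_groups: list[list[dict[str, typing.Any]]]
-- ):
--     sweep_items: tuple[dict[str, typing.Any], ...]
--     for sweep_items in itertools.product(*sweep_groups):
--         copy = {**base_cfg}
--
--         for sweep_dict in sweep_items:
--             copy.update(sweep_dict)
--
--         yield copy
-- ===== SOURCE B (Python) =====
-- def iter_sweep(base_cfg, sweep_groups):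
--     # Mixed-radix odometer: enumerate combination index k in [0, total) and decode
--     # digits arithmetically (k // stride % len) instead of itertools.product.
--     total = 1
--     for group in sweep_groups:
--         total *= len(group)
--     for k in range(total):
--         cfg = dict(base_cfg)
--         rem, stride = k, total
--         for group in sweep_groups:
--             stride //= len(group)
--             cfg.update(group[rem // stride])
--             rem %= stride
--         yield cfg
-- ===== Notes on version B (the rewrite author's own statement) =====
-- stated objective: alternative
-- what changed: itertools.product plus per-tuple merge loops is replaced by a mixed-radix odometer: B multiplies the group sizes into a total count and, for each combination index k, decodes each group's choice arithmetically via k // stride and k % stride, merging it directly into the config.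
import Mathlib
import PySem

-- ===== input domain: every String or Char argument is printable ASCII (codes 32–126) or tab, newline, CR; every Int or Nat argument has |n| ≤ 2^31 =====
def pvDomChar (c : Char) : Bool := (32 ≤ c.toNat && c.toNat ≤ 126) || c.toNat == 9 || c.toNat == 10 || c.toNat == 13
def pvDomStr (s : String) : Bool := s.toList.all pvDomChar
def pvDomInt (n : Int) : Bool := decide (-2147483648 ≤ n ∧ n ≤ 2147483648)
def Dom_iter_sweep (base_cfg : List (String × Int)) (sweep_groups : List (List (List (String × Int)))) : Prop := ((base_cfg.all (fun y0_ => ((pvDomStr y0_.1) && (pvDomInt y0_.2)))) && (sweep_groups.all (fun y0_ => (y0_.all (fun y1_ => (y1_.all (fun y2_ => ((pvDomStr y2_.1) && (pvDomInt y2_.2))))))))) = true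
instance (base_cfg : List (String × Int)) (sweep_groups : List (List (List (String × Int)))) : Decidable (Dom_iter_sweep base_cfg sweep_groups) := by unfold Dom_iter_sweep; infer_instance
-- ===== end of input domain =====

-- B replaces itertools.product with a mixed-radix odometer: it counts a combination
-- index k from 0 to the product of the group sizes and decodes each group's choice
-- arithmetically (k // stride % size); objective: alternative (same cost, different algorithm).

-- ===== PORT A =====
-- itertools.product(*sweep_groups): first group varies slowest
def pvProduct (gs : List (List (List (String × Int)))) : List (List (List (String × Int))) :=
  match gs with
  | [] => [[]]
  | g :: rest => g.flatMap (fun x => (pvProduct rest).map (fun t => x :: t))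

def iter_sweep (base_cfg : List (String × Int)) (sweep_groups : List (List (List (String × Int)))) : List (List (String × Int)) :=
  (pvProduct sweep_groups).map (fun sweep_items =>
    -- copy = {**base_cfg}; for sweep_dict in sweep_items: copy.update(sweep_dict)
    (sweep_items.foldl (fun copy sweep_dict => copy.update sweep_dict)
      (PySem.Dict.ofList base_cfg)).items)

-- ===== PORT B =====
-- total = 1; for group: total *= len(group); then for k in range(total) decode digits.
-- group[rem // stride] is ported with pyGetD (default []): for k < total the index
-- rem // stride is always in range (a consequence of the invariants proved below),
-- so the default is never consulted.
def iter_sweep_alt (base_cfg : List (String × Int)) (sweep_groups : List (List (List (String × Int)))) : List (List (String × Int)) :=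
  let total : Int := sweep_groups.foldl (fun t group => t * (group.length : Int)) 1
  (PySem.List.pyRange 0 total 1).map (fun k =>
    (sweep_groups.foldl
      (fun (st : PySem.Dict String Int × Int × Int) group =>
        let stride := PySem.Int.floordiv st.2.2 (group.length : Int)
        (st.1.update (PySem.List.pyGetD group (PySem.Int.floordiv st.2.1 stride) []),
         PySem.Int.mod st.2.1 stride, stride))
      (PySem.Dict.ofList base_cfg, k, total)).1.items)

-- ===== PRECONDITION & SPEC =====
def Spec_iter_sweep (base_cfg : List (String × Int)) (sweep_groups : List (List (List (String × Int)))) (out : List (List (String × Int))) : Prop := out = iter_sweep_alt base_cfg sweep_groups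
instance (base_cfg : List (String × Int)) (sweep_groups : List (List (List (String × Int)))) (out : List (List (String × Int))) : Decidable (Spec_iter_sweep base_cfg sweep_groups out) := by unfold Spec_iter_sweep; infer_instance

-- ===== CLAIM (what is proved, stated in full; the proofs are below) =====
def Claim_equal_iter_sweep : Prop := ∀ (base_cfg : List (String × Int)) (sweep_groups : List (List (List (String × Int)))), Dom_iter_sweep base_cfg sweep_groups → Spec_iter_sweep base_cfg sweep_groups (iter_sweep base_cfg sweep_groups)

-- ===== LEMMAS AND PROOFS =====

-- B's fold step, named for the proofs (definitionally the lambda in iter_sweep_alt)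
def pvStepB (st : PySem.Dict String Int × Int × Int) (group : List (List (String × Int))) :
    PySem.Dict String Int × Int × Int :=
  let stride := PySem.Int.floordiv st.2.2 (group.length : Int)
  (st.1.update (PySem.List.pyGetD group (PySem.Int.floordiv st.2.1 stride) []),
   PySem.Int.mod st.2.1 stride, stride)

-- the product of the group sizes, as a Nat
def pvTot (gs : List (List (List (String × Int)))) : Nat := (gs.map List.length).prod

theorem pvTot_cons (g : List (List (String × Int))) (rest : List (List (List (String × Int)))) :
    pvTot (g :: rest) = g.length * pvTot rest := by
  simp [pvTot]

theorem pvTotalFold (gs : List (List (List (String × Int)))) (c : Int) :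
    gs.foldl (fun t group => t * (group.length : Int)) c = c * (pvTot gs : Int) := by
  induction gs generalizing c with
  | nil => simp [pvTot]
  | cons g rest ih => simp [pvTot_cons, ih]; ring

-- range decomposition into blocks of length T
theorem pvRangeBlocks (n T : Nat) :
    List.range (n * T) = (List.range n).flatMap (fun i => (List.range T).map (fun j => i * T + j)) := by
  induction n with
  | zero => simp
  | succ n ih =>
      rw [Nat.succ_mul, List.range_add, List.range_succ, List.flatMap_append, ← ih]
      simp

-- one odometer step on input i*T+j decodes digit i and leaves remainder j
theorem pvStepB_decode (d : PySem.Dict String Int) (g : List (List (String × Int)))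
    (rest : List (List (List (String × Int)))) (i j : Nat)
    (hi : i < g.length) (hj : j < pvTot rest) :
    pvStepB (d, ((i * pvTot rest + j : Nat) : Int), ((g.length * pvTot rest : Nat) : Int)) g
      = (d.update g[i], (j : Int), (pvTot rest : Int)) := by
  have hT : 0 < pvTot rest := by omega
  have e1 : PySem.Int.floordiv ((g.length * pvTot rest : Nat) : Int) (g.length : Int)
      = ((pvTot rest : Nat) : Int) := by
    rw [PySem.Int.floordiv_natCast, Nat.mul_div_cancel_left _ (by omega)]
  have e2 : PySem.Int.floordiv ((i * pvTot rest + j : Nat) : Int) ((pvTot rest : Nat) : Int)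
      = ((i : Nat) : Int) := by
    rw [PySem.Int.floordiv_natCast]
    congr 1
    rw [Nat.add_comm, Nat.add_mul_div_right _ _ hT, Nat.div_eq_of_lt hj]
    omega
  have e3 : PySem.Int.mod ((i * pvTot rest + j : Nat) : Int) ((pvTot rest : Nat) : Int)
      = ((j : Nat) : Int) := by
    rw [PySem.Int.mod_natCast]
    congr 1
    rw [Nat.add_comm, Nat.add_mul_mod_self_right, Nat.mod_eq_of_lt hj]
  show (_, _, _) = _
  rw [e1, e2, e3, PySem.List.pyGetD_natCast, List.getD_eq_getElem _ _ hi]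

-- a list is the flatMap of its indexed elements
theorem pvFlatMapIdx {β : Type} (g : List (List (String × Int))) (F : List (String × Int) → List β) :
    (List.range g.length).flatMap (fun i => F (g.getD i [])) = g.flatMap F := by
  induction g with
  | nil => simp
  | cons x xs ih =>
      rw [List.length_cons, List.range_succ_eq_map]
      simp only [List.flatMap_cons, List.flatMap_map, List.getD_cons_zero, List.getD_cons_succ]
      rw [ih]

-- pointwise congruence for flatMap
theorem pvFlatMapCongr {α β : Type} {l : List α} {f h : α → List β}
    (w : ∀ a ∈ l, f a = h a) : l.flatMap f = l.flatMap h := by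
  induction l with
  | nil => rfl
  | cons x xs ih =>
      simp only [List.flatMap_cons]
      rw [w x (by simp), ih (fun a ha => w a (by simp [ha]))]

-- the odometer over range(pvTot gs) enumerates exactly A's product-and-merge results
theorem pvMain (gs : List (List (List (String × Int)))) (d : PySem.Dict String Int) :
    (List.range (pvTot gs)).map
        (fun (k : Nat) => (gs.foldl pvStepB (d, (k : Int), (pvTot gs : Int))).1)
      = (pvProduct gs).map (fun items => items.foldl (fun c sd => c.update sd) d) := by
  induction gs generalizing d with
  | nil => simp [pvTot, pvProduct]
  | cons g rest ih =>
      rw [pvTot_cons, pvRangeBlocks, List.map_flatMap]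
      rw [show pvProduct (g :: rest)
            = g.flatMap (fun x => (pvProduct rest).map (fun t => x :: t)) from rfl]
      rw [List.map_flatMap]
      rw [← pvFlatMapIdx g (fun x => ((pvProduct rest).map (fun t => x :: t)).map
            (fun items => items.foldl (fun c sd => c.update sd) d))]
      apply pvFlatMapCongr
      intro i hi
      rw [List.mem_range] at hi
      rw [List.map_map]
      have step : ∀ j ∈ List.range (pvTot rest),
          ((fun (k : Nat) => ((g :: rest).foldl pvStepB (d, (k : Int), ((g.length * pvTot rest : Nat) : Int))).1)
              ∘ (fun j : Nat => i * pvTot rest + j)) j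
            = (fun j : Nat => (rest.foldl pvStepB (d.update g[i], (j : Int), ((pvTot rest : Nat) : Int))).1) j := by
        intro j hj
        rw [List.mem_range] at hj
        show ((g :: rest).foldl pvStepB (d, ((i * pvTot rest + j : Nat) : Int),
            ((g.length * pvTot rest : Nat) : Int))).1 = _
        rw [List.foldl_cons, pvStepB_decode d g rest i j hi hj]
      rw [List.map_congr_left step, ih]
      rw [List.getD_eq_getElem _ _ hi, List.map_map]
      rfl

-- B's port, rephrased over a Nat-indexed range (definitional bridge)
theorem pvAltEq (b : List (String × Int)) (gs : List (List (List (String × Int)))) :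
    iter_sweep_alt b gs
      = ((List.range (pvTot gs)).map
          (fun (k : Nat) => (gs.foldl pvStepB (PySem.Dict.ofList b, (k : Int), (pvTot gs : Int))).1)).map
          PySem.Dict.items := by
  unfold iter_sweep_alt
  simp only [pvTotalFold, one_mul, PySem.List.pyRange_zero_natCast, List.map_map]
  rfl

-- ===== VERDICT (by name: the statement is the Claim_ definition above) =====
theorem iter_sweep_spec : Claim_equal_iter_sweep := by
  intro base_cfg sweep_groups _
  unfold Spec_iter_sweep
  rw [pvAltEq, pvMain]
  unfold iter_sweep
  rw [List.map_map]
  rfl
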